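-- pv_equiv track=rewrite | github.com/bytePatrol/PDF_Redact | src/pdf_redactor/redactor.py | parse_terms
-- ===== SOURCE A (Python) =====
-- def parse_terms(raw_input: str) -> list[str]:
--     """Parse a raw string of redaction terms into a deduplicated list.
--
--     Terms can be separated by newlines or commas. Leading/trailing whitespace
--     is stripped from each term. Empty terms and duplicates are removed.
--
--     Args:
--         raw_input: Raw text containing terms separated by newlines or commas.
--
--     Returns:
--         Ordered list of unique, non-empty terms.
--     """
--     seen: set[str] = set()
--     terms: list[str] = []
--     for line in raw_input.splitlines():
--         for part in line.split(","):
--             term = part.strip()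
--             if term and term not in seen:
--                 seen.add(term)
--                 terms.append(term)
--     return terms
-- ===== SOURCE B (Python) =====
-- def parse_terms(raw_input: str) -> list[str]:
--     """Single-pass character scanner: build each term in a buffer, flush it at
--     each comma or line-break character, then dedupe once with dict.fromkeys."""
--     tokens: list[str] = []
--     buf: list[str] = []
--     for ch in raw_input:
--         if ch in ",\r\n":
--             tokens.append("".join(buf).strip())
--             buf.clear()
--         else:
--             buf.append(ch)
--     tokens.append("".join(buf).strip())
--     return list(dict.fromkeys([t for t in tokens if t]))
-- ===== Notes on version B (the rewrite author's own statement) =====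
-- stated objective: alternative
-- what changed: Replaces A's two-level splitting (splitlines, then a per-line comma split, with an inline seen-set) by a single-pass character scanner that accumulates each term in a buffer, flushes it at every comma or line-break character, and dedupes once with dict.fromkeys at the end.
import Mathlib
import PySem

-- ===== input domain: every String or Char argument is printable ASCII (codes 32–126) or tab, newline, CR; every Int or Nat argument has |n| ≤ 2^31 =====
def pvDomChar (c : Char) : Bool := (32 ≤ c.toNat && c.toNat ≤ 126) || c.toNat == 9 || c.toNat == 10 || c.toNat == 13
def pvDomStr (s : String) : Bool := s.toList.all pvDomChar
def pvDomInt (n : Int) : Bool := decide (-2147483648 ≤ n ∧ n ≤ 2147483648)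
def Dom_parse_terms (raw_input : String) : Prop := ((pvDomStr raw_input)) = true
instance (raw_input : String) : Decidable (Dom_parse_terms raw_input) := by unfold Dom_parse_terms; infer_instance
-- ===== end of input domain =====

-- B replaces A's two-level split (splitlines, then split "," per line, with a seen-set inside
-- the loop) by a single-pass character scanner that flushes a buffer at each separator, with one
-- dict.fromkeys-style dedup pass at the end (alternative decomposition; same behaviour on Dom).

-- ===== PORT A =====
-- seen/terms accumulator pair; for line in splitlines: for part in line.split(","):
--   term = part.strip(); if term and term not in seen: seen.add(term); terms.append(term)
-- (line.split(",") = Str.split? line "," is always `some` since "," ≠ ""; getD [] just unwraps)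
def parse_terms (raw_input : String) : List String :=
  ((PySem.Str.splitlines raw_input).foldl
    (fun (st : PySem.Set String × List String) line =>
      ((PySem.Str.split? line ",").getD []).foldl
        (fun st part =>
          let term := PySem.Str.strip part
          if term ≠ "" ∧ PySem.Set.contains st.1 term = false then
            (PySem.Set.add st.1 term, st.2 ++ [term])
          else st) st)
    (PySem.Set.empty, [])).2

-- ===== PORT B =====
-- tokens/buf accumulators; for ch in raw_input: if ch in ",\r\n": flush "".join(buf).strip(),
-- clear buf; else append ch; final flush; then list(dict.fromkeys([t for t in tokens if t]))
def parse_terms_alt (raw_input : String) : List String :=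
  let st := raw_input.toList.foldl
    (fun (st : List String × List Char) c =>
      if c = ',' ∨ c = '\r' ∨ c = '\n' then
        (st.1 ++ [PySem.Str.strip (String.ofList st.2)], [])
      else (st.1, st.2 ++ [c]))
    ([], [])
  PySem.List.dedup
    ((st.1 ++ [PySem.Str.strip (String.ofList st.2)]).filter (fun t => t ≠ ""))

-- ===== PRECONDITION & SPEC =====
def Spec_parse_terms (raw_input : String) (out : List String) : Prop := out = parse_terms_alt raw_input
instance (raw_input : String) (out : List String) : Decidable (Spec_parse_terms raw_input out) := by unfold Spec_parse_terms; infer_instance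

-- ===== CLAIM (what is proved, stated in full; the proofs are below) =====
def Claim_equal_parse_terms : Prop := ∀ (raw_input : String), Dom_parse_terms raw_input → Spec_parse_terms raw_input (parse_terms raw_input)

-- ===== LEMMAS AND PROOFS =====

-- Python's splitlines break test, exactly as PySem.Chars.splitlines instantiates it.
def isB0 (c : Char) : Bool :=
  decide (c.toNat = 10) || decide (c.toNat = 13) || decide (c.toNat = 11) || decide (c.toNat = 12) ||
  decide (c.toNat = 28) || decide (c.toNat = 29) || decide (c.toNat = 30) || decide (c.toNat = 133) ||
  decide (c.toNat = 8232) || decide (c.toNat = 8233)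

-- pure comma split (buffer-passing form)
def spc (buf : List Char) : List Char → List (List Char)
  | [] => [buf]
  | c :: rest => if c = ',' then buf :: spc [] rest else spc (buf ++ [c]) rest

-- pure split at '\n' / '\r' taken individually (no "\r\n" collapsing, trailing piece kept)
def slNC (buf : List Char) : List Char → List (List Char)
  | [] => [buf]
  | c :: rest => if c = '\n' ∨ c = '\r' then buf :: slNC [] rest else slNC (buf ++ [c]) rest

-- the scanner's token list
def tk (buf : List Char) : List Char → List (List Char)
  | [] => [buf]
  | c :: rest => if c = ',' ∨ c = '\r' ∨ c = '\n' then buf :: tk [] rest else tk (buf ++ [c]) rest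

-- pure splitlines (buffer-passing form of PySem.Chars.splitlines.go)
def slp (isB : Char → Bool) (buf : List Char) : List Char → List (List Char)
  | [] => if buf = [] then [] else [buf]
  | '\r' :: '\n' :: rest => buf :: slp isB [] rest
  | c :: rest => if isB c then buf :: slp isB [] rest else slp isB (buf ++ [c]) rest

-- strip each token, drop the ones that strip to empty
def Fg (xs : List (List Char)) : List (List Char) :=
  (xs.map PySem.Chars.strip).filter (fun t => t ≠ [])

theorem slp_cons_ne (isB : Char → Bool) (buf : List Char) (c : Char) (rest : List Char)
    (hne : ∀ (r : List Char), c = '\x0d' → rest = '\n' :: r → False) :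
    slp isB buf (c :: rest) = if isB c then buf :: slp isB [] rest else slp isB (buf ++ [c]) rest := by
  rw [slp.eq_def]
  split
  · rename_i h; cases h
  · rename_i h
    rw [List.cons.injEq] at h
    cases hne _ h.1 h.2
  · rename_i c' rest' h
    rw [List.cons.injEq] at h
    obtain ⟨h1, h2⟩ := h
    subst h1; subst h2; rfl

theorem go_eq (isB : Char → Bool) : ∀ (buf l : List Char), ∀ (acc : List (List Char)),
    PySem.Chars.splitlines.go isB l buf.reverse acc = acc.reverse ++ slp isB buf l := by
  intro buf l
  induction buf, l using slp.induct (isB := isB) with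
  | case1 =>
    intro acc
    simp [PySem.Chars.splitlines.go, slp]
  | case2 buf h =>
    intro acc
    simp [PySem.Chars.splitlines.go, slp, h]
  | case3 buf rest ih =>
    intro acc
    rw [show PySem.Chars.splitlines.go isB ('\r' :: '\n' :: rest) buf.reverse acc
        = PySem.Chars.splitlines.go isB rest [] (buf.reverse.reverse :: acc) from rfl]
    rw [show ([] : List Char) = ([] : List Char).reverse from rfl, ih]
    simp [slp]
  | case4 buf c rest hne hB ih =>
    intro acc
    rw [PySem.Chars.splitlines.go.eq_def]
    split
    · simp_all
    · rename_i h
      rw [List.cons.injEq] at h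
      cases hne _ h.1 h.2
    · rename_i c' rest' h
      rw [List.cons.injEq] at h
      obtain ⟨h1, h2⟩ := h
      subst h1; subst h2
      rw [hB]
      rw [show ([] : List Char) = ([] : List Char).reverse from rfl, ih]
      rw [slp_cons_ne isB buf c rest hne, hB]
      simp
  | case5 buf c rest hne hB ih =>
    intro acc
    rw [PySem.Chars.splitlines.go.eq_def]
    split
    · simp_all
    · rename_i h
      rw [List.cons.injEq] at h
      cases hne _ h.1 h.2
    · rename_i c' rest' h
      rw [List.cons.injEq] at h
      obtain ⟨h1, h2⟩ := h
      subst h1; subst h2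
      rw [Bool.of_not_eq_true hB, if_neg (by simp)]
      rw [show c :: buf.reverse = (buf ++ [c]).reverse by simp, ih]
      rw [slp_cons_ne isB buf c rest hne]
      simp only [Bool.of_not_eq_true hB, Bool.false_eq_true, if_false]

theorem splitlines_eq_slp (cs : List Char) : PySem.Chars.splitlines cs = slp isB0 [] cs := by
  have h := go_eq isB0 [] cs []
  simpa using h

theorem spo_go_eq : ∀ (fuel : Nat) (buf l : List Char) (acc : List (List Char)),
    l.length < fuel →
    PySem.Chars.splitOn.go [','] fuel l buf.reverse acc = acc.reverse ++ spc buf l := by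
  intro fuel
  induction fuel with
  | zero => intro _ _ _ h; omega
  | succ n ih =>
    intro buf l acc h
    cases l with
    | nil => simp [PySem.Chars.splitOn.go, spc]
    | cons c rest =>
      rw [show PySem.Chars.splitOn.go [','] (n+1) (c :: rest) buf.reverse acc
          = if [','].isPrefixOf (c :: rest) then
              PySem.Chars.splitOn.go [','] n (List.drop [','].length (c :: rest)) [] (buf.reverse.reverse :: acc)
            else PySem.Chars.splitOn.go [','] n rest (c :: buf.reverse) acc from rfl]
      by_cases hc : c = ','
      · subst hc
        rw [if_pos (by simp [List.isPrefixOf])]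
        have ihx := ih [] (List.drop [','].length (',' :: rest)) (buf.reverse.reverse :: acc)
          (by simp at h ⊢; omega)
        simp only [List.reverse_nil] at ihx
        rw [ihx]
        simp [spc]
      · rw [if_neg (by simp [List.isPrefixOf]; exact Ne.symm hc)]
        rw [show c :: buf.reverse = (buf ++ [c]).reverse by simp,
          ih (buf ++ [c]) rest acc (by simp at h ⊢; omega)]
        simp [spc, hc]

theorem splitOn_eq_spc (l : List Char) : PySem.Chars.splitOn l [','] = spc [] l := by
  have h := spo_go_eq (l.length + 1) [] l [] (by omega)
  simpa [PySem.Chars.splitOn] using h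

theorem slNC_buf : ∀ (l buf : List Char),
    slNC buf l = (buf ++ (slNC [] l).headI) :: (slNC [] l).tail := by
  intro l
  induction l with
  | nil => intro buf; simp [slNC]
  | cons c rest ih =>
    intro buf
    by_cases hc : c = '\n' ∨ c = '\r'
    · simp [slNC, hc]
    · simp only [slNC, if_neg hc]
      rw [ih (buf ++ [c]), ih ([] ++ [c])]
      simp

theorem tk_comp : ∀ (l : List Char) (buf hI : List Char) (tl : List (List Char)),
    slNC [] l = hI :: tl →
    tk buf l = spc buf hI ++ tl.flatMap (fun x => spc [] x) := by
  intro l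
  induction l with
  | nil =>
    intro buf hI tl h
    rw [show slNC [] [] = [[]] from rfl] at h
    injection h with h1 h2
    subst h1; subst h2
    simp [tk, spc]
  | cons c rest ih =>
    intro buf hI tl h
    have hrest := slNC_buf rest []
    simp only [List.nil_append] at hrest
    by_cases hl : c = '\n' ∨ c = '\x0d'
    · have hsep : c = ',' ∨ c = '\x0d' ∨ c = '\n' := by tauto
      rw [show slNC [] (c :: rest) = [] :: slNC [] rest by rw [slNC.eq_def]; simp [hl]] at h
      injection h with h1 h2
      subst h1; subst h2
      rw [show tk buf (c :: rest) = buf :: tk [] rest by rw [tk.eq_def]; simp [hsep]]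
      rw [ih [] _ _ hrest]
      rw [hrest]
      simp [spc]
    · by_cases hc : c = ','
      · subst hc
        rw [show slNC [] (',' :: rest) = slNC ([] ++ [',']) rest by rw [slNC.eq_def]; simp] at h
        rw [slNC_buf rest ([] ++ [','])] at h
        simp only [List.nil_append, List.singleton_append] at h
        injection h with h1 h2
        subst h1; subst h2
        rw [show tk buf (',' :: rest) = buf :: tk [] rest by rw [tk.eq_def]; simp]
        rw [ih [] _ _ hrest]
        rw [show spc buf (',' :: (slNC [] rest).headI) = buf :: spc [] (slNC [] rest).headI by
          rw [spc.eq_def]; simp]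
        simp
      · have hsep : ¬(c = ',' ∨ c = '\x0d' ∨ c = '\n') := by tauto
        rw [show slNC [] (c :: rest) = slNC ([] ++ [c]) rest by rw [slNC.eq_def]; simp [hl]] at h
        rw [slNC_buf rest ([] ++ [c])] at h
        simp only [List.nil_append, List.singleton_append] at h
        injection h with h1 h2
        subst h1; subst h2
        rw [show tk buf (c :: rest) = tk (buf ++ [c]) rest by rw [tk.eq_def]; simp [hsep]]
        rw [ih (buf ++ [c]) _ _ hrest]
        rw [show spc buf (c :: (slNC [] rest).headI) = spc (buf ++ [c]) (slNC [] rest).headI by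
          rw [spc.eq_def]; simp [hc]]

theorem char_eq_of_toNat {c d : Char} (h : c.toNat = d.toNat) : c = d := by
  unfold Char.toNat at h
  exact Char.ext (UInt32.toNat_inj.mp h)

theorem isB0_dom {c : Char} (h : pvDomChar c = true) : isB0 c = true ↔ (c = '\n' ∨ c = '\r') := by
  simp only [pvDomChar, Bool.or_eq_true, Bool.and_eq_true, decide_eq_true_eq, beq_iff_eq] at h
  constructor
  · intro hb
    simp only [isB0, Bool.or_eq_true, decide_eq_true_eq] at hb
    have h10 : c.toNat = 10 ∨ c.toNat = 13 := by omega
    rcases h10 with h10 | h13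
    · exact Or.inl (char_eq_of_toNat (by rw [h10]; rfl))
    · exact Or.inr (char_eq_of_toNat (by rw [h13]; rfl))
  · rintro (rfl | rfl) <;> rfl

theorem Fg_append (a b : List (List Char)) : Fg (a ++ b) = Fg a ++ Fg b := by
  simp [Fg]

theorem Fg_slp_slNC : ∀ (buf l : List Char), (∀ c ∈ l, pvDomChar c = true) →
    Fg ((slp isB0 buf l).flatMap (fun x => spc [] x)) =
    Fg ((slNC buf l).flatMap (fun x => spc [] x)) := by
  intro buf l
  induction buf, l using slp.induct (isB := isB0) with
  | case1 =>
    intro _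
    simp [slp, slNC, spc, Fg, PySem.Chars.strip, PySem.Chars.lstrip, PySem.Chars.rstrip]
  | case2 buf h =>
    intro _
    simp [slp, slNC, h]
  | case3 buf rest ih =>
    intro hd
    have hd' : ∀ c ∈ rest, pvDomChar c = true := fun c hc => hd c (by simp [hc])
    simp only [slp]
    rw [show slNC buf ('\r' :: '\n' :: rest) = buf :: slNC [] ('\n' :: rest) by simp [slNC]]
    rw [show slNC [] ('\n' :: rest) = [] :: slNC [] rest by simp [slNC]]
    simp only [List.flatMap_cons]
    rw [Fg_append, Fg_append, Fg_append, ih hd']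
    simp [spc, Fg, PySem.Chars.strip, PySem.Chars.lstrip, PySem.Chars.rstrip]
  | case4 buf c rest hne hB ih =>
    intro hd
    have hdc : pvDomChar c = true := hd c (by simp)
    have hd' : ∀ x ∈ rest, pvDomChar x = true := fun x hx => hd x (by simp [hx])
    have hcr : c = '\n' ∨ c = '\r' := (isB0_dom hdc).mp hB
    rw [slp_cons_ne isB0 buf c rest hne, if_pos hB]
    rw [show slNC buf (c :: rest) = buf :: slNC [] rest by simp [slNC, hcr]]
    simp only [List.flatMap_cons]
    rw [Fg_append, Fg_append, ih hd']
  | case5 buf c rest hne hB ih =>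
    intro hd
    have hdc : pvDomChar c = true := hd c (by simp)
    have hd' : ∀ x ∈ rest, pvDomChar x = true := fun x hx => hd x (by simp [hx])
    have hcr : ¬(c = '\n' ∨ c = '\r') := fun h => hB ((isB0_dom hdc).mpr h)
    rw [slp_cons_ne isB0 buf c rest hne, if_neg hB]
    rw [show slNC buf (c :: rest) = slNC (buf ++ [c]) rest by simp [slNC, hcr]]
    exact ih hd'

-- ofList/toList conversions
theorem strip_ofList (x : List Char) :
    PySem.Str.strip (String.ofList x) = String.ofList (PySem.Chars.strip x) := by
  apply String.toList_inj.mp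
  rw [PySem.Str.toList_strip, String.toList_ofList, String.toList_ofList]

theorem splitlines_ofList (s : String) :
    PySem.Str.splitlines s = (PySem.Chars.splitlines s.toList).map String.ofList := by
  rw [← PySem.Str.splitlines_map_toList s, List.map_map]
  conv_lhs => rw [← List.map_id (PySem.Str.splitlines s)]
  exact List.map_congr_left (fun a _ => by simp)

theorem split_comma (line : String) :
    (PySem.Str.split? line ",").getD [] = (PySem.Chars.splitOn line.toList [',']).map String.ofList := by
  have h := PySem.Str.split?_map line ","
  rw [show (",":String).toList = [','] from rfl] at h
  rw [show PySem.Chars.split? line.toList [','] = some (PySem.Chars.splitOn line.toList [','])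
      from by simp [PySem.Chars.split?]] at h
  cases ho : PySem.Str.split? line "," with
  | none => rw [ho] at h; simp at h
  | some xs =>
    rw [ho] at h
    simp only [Option.map_some, Option.some.injEq] at h
    rw [← h]
    simp only [Option.getD_some, List.map_map]
    conv_lhs => rw [← List.map_id xs]
    exact List.map_congr_left (fun a _ => by simp)

-- A's seen/terms loop over a flattened list of parts, started from equal components (s, s)
theorem parse_terms_loop (ps : List String) (s : PySem.Set String) :
    ps.foldl
      (fun (st : PySem.Set String × List String) part =>
        let term := PySem.Str.strip part
        if term ≠ "" ∧ PySem.Set.contains st.1 term = false then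
          (PySem.Set.add st.1 term, st.2 ++ [term])
        else st) (s, s) =
    (PySem.Set.update s ((ps.map PySem.Str.strip).filter (fun t => t ≠ "")),
     PySem.Set.update s ((ps.map PySem.Str.strip).filter (fun t => t ≠ ""))) := by
  induction ps generalizing s with
  | nil => simp [PySem.Set.update]
  | cons p ps ih =>
    simp only [List.foldl_cons, List.map_cons]
    by_cases h1 : PySem.Str.strip p = ""
    · simpa [h1] using ih s
    · by_cases hm : PySem.Str.strip p ∈ s
      · have hc : PySem.Set.contains s (PySem.Str.strip p) = true := by
          simp [PySem.Set.contains, hm]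
        have hadd : PySem.Set.add s (PySem.Str.strip p) = s := by
          simp [PySem.Set.add, hm]
        simp only [h1, hc, ne_eq, not_false_iff, Bool.true_eq_false, and_false,
          if_false]
        rw [ih]
        simp [h1, PySem.Set.update, hadd]
      · have hc : PySem.Set.contains s (PySem.Str.strip p) = false := by
          simp [PySem.Set.contains, hm]
        have hadd : PySem.Set.add s (PySem.Str.strip p) = s ++ [PySem.Str.strip p] := by
          simp [PySem.Set.add, hm]
        simp only [h1, hc, ne_eq, not_false_iff, and_self, if_true]
        rw [show (PySem.Set.add s (PySem.Str.strip p), s ++ [PySem.Str.strip p]) =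
              (PySem.Set.add s (PySem.Str.strip p), PySem.Set.add s (PySem.Str.strip p)) by
            rw [hadd]]
        rw [ih]
        simp [h1, PySem.Set.update]

-- A in normal form: dedup of the stripped non-empty parts of all lines
theorem A_nf (raw : String) :
    parse_terms raw = PySem.List.dedup
      (((PySem.Str.splitlines raw).flatMap
          (fun line => ((PySem.Str.split? line ",").getD []).map PySem.Str.strip)).filter
        (fun t => t ≠ "")) := by
  unfold parse_terms
  rw [← List.foldl_flatMap,
    show ((PySem.Set.empty : PySem.Set String), ([] : List String)) =
      ((PySem.Set.empty : PySem.Set String), (PySem.Set.empty : PySem.Set String)) from rfl,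
    parse_terms_loop]
  simp [PySem.Set.update, PySem.List.dedup_eq_ofList, PySem.Set.ofList_eq_foldl,
    List.map_flatMap, PySem.Set.empty]

-- the scanner loop of B: fold plus final flush = the mapped token list
theorem scan_fold : ∀ (l : List Char) (acc : List String) (buf : List Char),
    (l.foldl
      (fun (st : List String × List Char) c =>
        if c = ',' ∨ c = '\r' ∨ c = '\n' then
          (st.1 ++ [PySem.Str.strip (String.ofList st.2)], [])
        else (st.1, st.2 ++ [c])) (acc, buf)).1 ++
    [PySem.Str.strip (String.ofList
      (l.foldl
        (fun (st : List String × List Char) c =>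
          if c = ',' ∨ c = '\r' ∨ c = '\n' then
            (st.1 ++ [PySem.Str.strip (String.ofList st.2)], [])
          else (st.1, st.2 ++ [c])) (acc, buf)).2)] =
    acc ++ (tk buf l).map (fun b => PySem.Str.strip (String.ofList b)) := by
  intro l
  induction l with
  | nil => intro acc buf; simp [tk]
  | cons c rest ih =>
    intro acc buf
    by_cases hc : c = ',' ∨ c = '\r' ∨ c = '\n'
    · simp only [List.foldl_cons, if_pos hc]
      rw [show tk buf (c :: rest) = buf :: tk [] rest by rw [tk.eq_def]; simp [hc]]
      simp only [List.map_cons]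
      rw [show acc ++ PySem.Str.strip (String.ofList buf) ::
            (tk [] rest).map (fun b => PySem.Str.strip (String.ofList b)) =
          (acc ++ [PySem.Str.strip (String.ofList buf)]) ++
            (tk [] rest).map (fun b => PySem.Str.strip (String.ofList b)) by simp]
      exact ih (acc ++ [PySem.Str.strip (String.ofList buf)]) []
    · simp only [List.foldl_cons, if_neg hc]
      rw [show tk buf (c :: rest) = tk (buf ++ [c]) rest by rw [tk.eq_def]; simp [hc]]
      exact ih acc (buf ++ [c])

-- pushing filter (≠ "") through map (ofList ∘ strip): it is map ofList of Fg
theorem filter_map_ofList (ys : List (List Char)) :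
    ((ys.map (fun p => String.ofList (PySem.Chars.strip p))).filter (fun t => t ≠ "")) =
    (Fg ys).map String.ofList := by
  induction ys with
  | nil => rfl
  | cons y ys ih =>
    by_cases h : PySem.Chars.strip y = []
    · simp only [Fg] at ih ⊢
      simp [h]
      simpa using ih
    · have h' : ¬(String.ofList (PySem.Chars.strip y) = "") := by
        simp [String.ofList_eq_empty_iff, h]
      simp only [Fg] at ih ⊢
      simp [h, h']
      simpa using ih

-- ===== VERDICT (by name: the statement is the Claim_ definition above) =====
theorem parse_terms_spec : Claim_equal_parse_terms := by
  intro raw hdom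
  unfold Spec_parse_terms
  have hd : ∀ c ∈ raw.toList, pvDomChar c = true := by
    have := hdom
    unfold Dom_parse_terms pvDomStr at this
    exact fun c hc => List.all_eq_true.mp this c hc
  -- A side to char level
  rw [A_nf raw, splitlines_ofList raw]
  have hA : ((((PySem.Chars.splitlines raw.toList).map String.ofList).flatMap
        (fun line => ((PySem.Str.split? line ",").getD []).map PySem.Str.strip)).filter
      (fun t => t ≠ "")) =
      (Fg ((PySem.Chars.splitlines raw.toList).flatMap (fun x => spc [] x))).map String.ofList := by
    rw [List.flatMap_map]
    have : ∀ l : List Char,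
        ((PySem.Str.split? (String.ofList l) ",").getD []).map PySem.Str.strip =
        (spc [] l).map (fun p => String.ofList (PySem.Chars.strip p)) := by
      intro l
      rw [split_comma, String.toList_ofList, splitOn_eq_spc]
      simp [List.map_map, Function.comp_def, strip_ofList]
    simp only [this]
    rw [← List.map_flatMap]
    exact filter_map_ofList _
  rw [hA]
  -- B side to char level
  unfold parse_terms_alt
  simp only [scan_fold raw.toList [] [], List.nil_append]
  have hB : ((tk [] raw.toList).map (fun b => PySem.Str.strip (String.ofList b))).filter
      (fun t => t ≠ "") = (Fg (tk [] raw.toList)).map String.ofList := by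
    simp only [strip_ofList]
    exact filter_map_ofList _
  rw [hB]
  -- tokens agree
  congr 2
  rw [splitlines_eq_slp, Fg_slp_slNC [] raw.toList hd]
  have hrest := slNC_buf raw.toList []
  simp only [List.nil_append] at hrest
  rw [tk_comp raw.toList [] _ _ hrest]
  rw [hrest]
  simp [Fg_append]
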